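-- pv_equiv track=rewrite | github.com/mridungeorge/askmydocs | backend/structured_outputs.py | detect_output_type
-- ===== SOURCE A (Python) =====
-- def detect_output_type(query: str) -> str:
--     """Classify what type of structured output this query needs."""
--     query_lower = query.lower()
--
--     if any(s in query_lower for s in ["compare", "difference", "vs", "versus", "contrast"]):
--         return "comparison"
--     if any(s in query_lower for s in ["list", "enumerate", "what are all", "give me all"]):
--         return "list"
--     if any(s in query_lower for s in ["how many", "percentage", "rate", "score", "number of", "$", "revenue"]):
--         return "metric"
--     if any(s in query_lower for s in ["timeline", "chronological", "history", "when did", "sequence of"]):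
--         return "timeline"
--     if any(s in query_lower for s in ["how does", "explain how", "step by step", "walk me through"]):
--         return "explanation"
--
--     return "standard"
-- ===== SOURCE B (Python) =====
-- # Flat keyword -> priority map; one exhaustive pass keeps the minimum matched
-- # priority, which is then mapped to a type name by indexing. Correct because
-- # A's first-matching-group rule equals the minimum priority among all matches.
-- _KEYWORD_PRIORITY = {
--     "compare": 0, "difference": 0, "vs": 0, "versus": 0, "contrast": 0,
--     "list": 1, "enumerate": 1, "what are all": 1, "give me all": 1,
--     "how many": 2, "percentage": 2, "rate": 2, "score": 2,
--     "number of": 2, "$": 2, "revenue": 2,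
--     "timeline": 3, "chronological": 3, "history": 3, "when did": 3,
--     "sequence of": 3,
--     "how does": 4, "explain how": 4, "step by step": 4, "walk me through": 4,
-- }
-- _TYPE_BY_PRIORITY = ["comparison", "list", "metric", "timeline", "explanation", "standard"]
--
--
-- def detect_output_type(query: str) -> str:
--     ql = query.lower()
--     best = 5
--     for kw, pri in _KEYWORD_PRIORITY.items():
--         if pri < best and kw in ql:
--             best = pri
--     return _TYPE_BY_PRIORITY[best]
-- ===== Notes on version B (the rewrite author's own statement) =====
-- stated objective: alternative
-- what changed: Replaced A's ordered early-return branch cascade with a single exhaustive fold over a flat keyword-to-priority map that maintains the minimum matched priority, then indexes a priority-to-type array.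
import Mathlib
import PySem

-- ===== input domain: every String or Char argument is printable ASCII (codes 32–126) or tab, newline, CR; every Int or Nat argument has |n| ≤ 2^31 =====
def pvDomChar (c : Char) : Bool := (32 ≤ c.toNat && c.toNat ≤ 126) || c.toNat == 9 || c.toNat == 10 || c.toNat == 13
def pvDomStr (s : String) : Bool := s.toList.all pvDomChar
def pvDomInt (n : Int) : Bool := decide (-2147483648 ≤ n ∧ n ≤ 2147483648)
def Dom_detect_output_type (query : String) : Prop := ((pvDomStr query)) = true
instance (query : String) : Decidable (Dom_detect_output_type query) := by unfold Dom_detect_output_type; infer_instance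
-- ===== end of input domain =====

-- B replaces A's ordered early-return branch cascade with one exhaustive fold over a
-- flat keyword->priority map keeping the minimum matched priority (objective: alternative).


-- ===== PORT A =====
def detect_output_type (query : String) : String :=
  let query_lower := PySem.Str.lower query
  if ["compare", "difference", "vs", "versus", "contrast"].any
       (fun s => PySem.Str.isIn s query_lower) then "comparison"
  else if ["list", "enumerate", "what are all", "give me all"].any
       (fun s => PySem.Str.isIn s query_lower) then "list"
  else if ["how many", "percentage", "rate", "score", "number of", "$", "revenue"].any
       (fun s => PySem.Str.isIn s query_lower) then "metric"
  else if ["timeline", "chronological", "history", "when did", "sequence of"].any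
       (fun s => PySem.Str.isIn s query_lower) then "timeline"
  else if ["how does", "explain how", "step by step", "walk me through"].any
       (fun s => PySem.Str.isIn s query_lower) then "explanation"
  else "standard"

-- ===== PORT B =====
-- _KEYWORD_PRIORITY.items() in insertion order (keys are distinct)
def keywordPriority : List (String × Nat) :=
  [("compare", 0), ("difference", 0), ("vs", 0), ("versus", 0), ("contrast", 0),
   ("list", 1), ("enumerate", 1), ("what are all", 1), ("give me all", 1),
   ("how many", 2), ("percentage", 2), ("rate", 2), ("score", 2),
   ("number of", 2), ("$", 2), ("revenue", 2),
   ("timeline", 3), ("chronological", 3), ("history", 3), ("when did", 3),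
   ("sequence of", 3),
   ("how does", 4), ("explain how", 4), ("step by step", 4), ("walk me through", 4)]

def typeByPriority : List String :=
  ["comparison", "list", "metric", "timeline", "explanation", "standard"]

-- loop body: if pri < best and kw in ql: best = pri
def kwStep (ql : String) (best : Nat) (kp : String × Nat) : Nat :=
  if kp.2 < best ∧ PySem.Str.isIn kp.1 ql then kp.2 else best

-- _TYPE_BY_PRIORITY[best]: best always lies in [0,5], so getD is exact list indexing here
def detect_output_type_alt (query : String) : String :=
  let ql := PySem.Str.lower query
  let best := keywordPriority.foldl (kwStep ql) 5
  typeByPriority.getD best "standard"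

-- ===== PRECONDITION & SPEC =====
def Spec_detect_output_type (query : String) (out : String) : Prop := out = detect_output_type_alt query
instance (query : String) (out : String) : Decidable (Spec_detect_output_type query out) := by unfold Spec_detect_output_type; infer_instance

-- ===== CLAIM (what is proved, stated in full; the proofs are below) =====
def Claim_equal_detect_output_type : Prop := ∀ (query : String), Dom_detect_output_type query → Spec_detect_output_type query (detect_output_type query)

-- ===== LEMMAS AND PROOFS =====

-- Folding one same-priority keyword group: the accumulator drops to p iff p beats it and some keyword matches.
theorem foldl_kw_group (ql : String) (kws : List String) (p b : Nat) :
    List.foldl (kwStep ql) b (kws.map (fun k => (k, p))) =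
      if p < b ∧ kws.any (fun k => PySem.Str.isIn k ql) then p else b := by
  induction kws generalizing b with
  | nil => simp
  | cons k rest ih =>
    simp only [List.map_cons, List.foldl_cons, List.any_cons, Bool.or_eq_true, kwStep]
    by_cases hp : p < b
    · by_cases hk : PySem.Str.isIn k ql = true
      · rw [if_pos ⟨hp, hk⟩, ih, if_neg (fun h => absurd h.1 (lt_irrefl p)),
            if_pos ⟨hp, Or.inl hk⟩]
      · rw [if_neg (fun h => hk h.2), ih]
        by_cases hr : (rest.any fun k => PySem.Str.isIn k ql) = true
        · rw [if_pos ⟨hp, hr⟩, if_pos ⟨hp, Or.inr hr⟩]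
        · rw [if_neg (fun h => hr h.2), if_neg (fun h => h.2.elim (fun h' => hk h') hr)]
    · rw [if_neg (fun h => hp h.1), ih, if_neg (fun h => hp h.1), if_neg (fun h => hp h.1)]

-- the flat map is the concatenation of the five priority groups
theorem keywordPriority_eq :
    keywordPriority =
      (["compare", "difference", "vs", "versus", "contrast"].map (fun k => (k, 0)))
      ++ (["list", "enumerate", "what are all", "give me all"].map (fun k => (k, 1)))
      ++ (["how many", "percentage", "rate", "score", "number of", "$", "revenue"].map (fun k => (k, 2)))
      ++ (["timeline", "chronological", "history", "when did", "sequence of"].map (fun k => (k, 3)))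
      ++ (["how does", "explain how", "step by step", "walk me through"].map (fun k => (k, 4))) := rfl

-- ===== VERDICT (by name: the statement is the Claim_ definition above) =====
theorem detect_output_type_spec : Claim_equal_detect_output_type := by
  intro query _
  unfold Spec_detect_output_type detect_output_type detect_output_type_alt
  simp only [keywordPriority_eq, List.foldl_append, foldl_kw_group]
  generalize (["compare", "difference", "vs", "versus", "contrast"].any
      (fun s => PySem.Str.isIn s (PySem.Str.lower query))) = a1
  generalize (["list", "enumerate", "what are all", "give me all"].any
      (fun s => PySem.Str.isIn s (PySem.Str.lower query))) = a2
  generalize (["how many", "percentage", "rate", "score", "number of", "$", "revenue"].any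
      (fun s => PySem.Str.isIn s (PySem.Str.lower query))) = a3
  generalize (["timeline", "chronological", "history", "when did", "sequence of"].any
      (fun s => PySem.Str.isIn s (PySem.Str.lower query))) = a4
  generalize (["how does", "explain how", "step by step", "walk me through"].any
      (fun s => PySem.Str.isIn s (PySem.Str.lower query))) = a5
  revert a1 a2 a3 a4 a5
  decide
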